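-- pv_equiv track=rewrite | github.com/kgryczan/excelbi_puzzles | Excel/800-899/868/Challenge 868.py | pi_code
-- ===== SOURCE A (Python) =====
-- import string
--
-- def pi_code(text):
--     pi_digits = [3, 1, 4, 1, 5, 9, 2, 6, 5, 3, 5, 8, 9, 7, 9, 3, 2, 3, 8, 4]
--     lower = string.ascii_lowercase
--     text_chars = list(text)
--     pi_idx = 0
--     shifted_chars = []
--     for char in text_chars:
--         if char == " ":
--             shifted_chars.append(" ")
--         elif char in lower:
--             shift = pi_digits[pi_idx]
--             orig_pos = lower.index(char)
--             new_pos = (orig_pos + shift) % 26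
--             shifted_chars.append(lower[new_pos])
--             pi_idx = (pi_idx + 1) % len(pi_digits)
--         else:
--             shifted_chars.append(char)
--     return "".join(shifted_chars)
-- ===== SOURCE B (Python) =====
-- import string
-- from itertools import cycle
--
-- def pi_code(text):
--     pi_digits = [3, 1, 4, 1, 5, 9, 2, 6, 5, 3, 5, 8, 9, 7, 9, 3, 2, 3, 8, 4]
--     lower = string.ascii_lowercase
--     letters = [c for c in text if c in lower]
--     encoded = [lower[(lower.index(c) + d) % 26] for c, d in zip(letters, cycle(pi_digits))]
--     it = iter(encoded)
--     return "".join(next(it) if c in lower else c for c in text)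
-- ===== Notes on version B (the rewrite author's own statement) =====
-- stated objective: alternative
-- what changed: Replaces A's single loop threading pi_idx through every character by a filter-then-encode pass over just the lowercase letters (paired with cycle(pi_digits)) followed by a merge pass that reinserts the encoded letters into the original text.
import Mathlib
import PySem

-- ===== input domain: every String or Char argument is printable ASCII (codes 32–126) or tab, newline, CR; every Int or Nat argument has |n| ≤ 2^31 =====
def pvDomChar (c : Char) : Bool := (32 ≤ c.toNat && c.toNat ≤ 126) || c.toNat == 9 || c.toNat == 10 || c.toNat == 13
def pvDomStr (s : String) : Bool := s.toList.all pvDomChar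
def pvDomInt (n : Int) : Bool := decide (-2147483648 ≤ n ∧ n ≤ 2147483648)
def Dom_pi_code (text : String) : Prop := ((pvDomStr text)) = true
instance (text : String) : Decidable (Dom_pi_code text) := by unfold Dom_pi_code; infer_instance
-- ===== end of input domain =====

-- B splits A's single stateful loop into two passes (filter+encode the letters, then merge them back): same cost, different decomposition.

-- ===== PORT A =====
def piDigitsA : List Nat := [3, 1, 4, 1, 5, 9, 2, 6, 5, 3, 5, 8, 9, 7, 9, 3, 2, 3, 8, 4]
def lowerA : List Char := "abcdefghijklmnopqrstuvwxyz".toList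

-- one iteration of A's loop: state = (pi_idx, shifted_chars)
def piStepA (st : Nat × List Char) (c : Char) : Nat × List Char :=
  if c = ' ' then (st.1, st.2 ++ [' '])
  else if lowerA.contains c then
    let shift := piDigitsA.getD st.1 0
    let origPos := (PySem.List.index? lowerA c).getD 0
    let newPos := (origPos + shift) % 26
    ((st.1 + 1) % piDigitsA.length, st.2 ++ [lowerA.getD newPos 'a'])
  else (st.1, st.2 ++ [c])

def pi_code (text : String) : String :=
  String.ofList (text.toList.foldl piStepA (0, [])).2

-- ===== PORT B =====
def piDigitsB : List Nat := [3, 1, 4, 1, 5, 9, 2, 6, 5, 3, 5, 8, 9, 7, 9, 3, 2, 3, 8, 4]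
def lowerB : List Char := "abcdefghijklmnopqrstuvwxyz".toList

-- lower[(lower.index(c) + d) % 26] with d the i-th digit of cycle(pi_digits)
def piEncB (i : Nat) (c : Char) : Char :=
  lowerB.getD (((PySem.List.index? lowerB c).getD 0 + piDigitsB.getD (i % piDigitsB.length) 0) % 26) 'a'

-- '"".join(next(it) if c in lower else c for c in text)': walk text, pull encoded letters in order
def piMergeB : List Char → List Char → List Char
  | [], _ => []
  | c :: cs, enc =>
    if lowerB.contains c then
      match enc with
      | e :: es => e :: piMergeB cs es
      | [] => []          -- unreachable: encoded has exactly one element per lowercase letter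
    else c :: piMergeB cs enc

def pi_code_alt (text : String) : String :=
  let letters := text.toList.filter (fun c => lowerB.contains c)
  let encoded := letters.mapIdx piEncB
  String.ofList (piMergeB text.toList encoded)

-- ===== PRECONDITION & SPEC =====
def Spec_pi_code (text : String) (out : String) : Prop := out = pi_code_alt text
instance (text : String) (out : String) : Decidable (Spec_pi_code text out) := by unfold Spec_pi_code; infer_instance

-- ===== CLAIM (what is proved, stated in full; the proofs are below) =====
def Claim_equal_pi_code : Prop := ∀ (text : String), Dom_pi_code text → Spec_pi_code text (pi_code text)

-- ===== LEMMAS AND PROOFS =====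

theorem lowerA_eq_lowerB : lowerA = lowerB := rfl
theorem piDigitsA_eq : piDigitsA = piDigitsB := rfl

-- encoding the letter list starting at cycle position k (proof-side generalisation of B's mapIdx)
def piEncFrom (k : Nat) : List Char → List Char
  | [] => []
  | c :: ls => piEncB k c :: piEncFrom (k + 1) ls

theorem piEncFrom_eq_mapIdx (ls : List Char) : ∀ (k : Nat),
    piEncFrom k ls = ls.mapIdx (fun i c => piEncB (k + i) c) := by
  induction ls with
  | nil => intro k; rfl
  | cons c ls ih =>
    intro k
    rw [List.mapIdx_cons]
    have hf : (fun (i : Nat) (c : Char) => piEncB (k + (i + 1)) c)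
        = (fun (i : Nat) (c : Char) => piEncB (k + 1 + i) c) := by
      funext i c; congr 1; omega
    simp only [piEncFrom, ih (k + 1), hf, Nat.add_zero]

theorem piEncFrom_zero (ls : List Char) : piEncFrom 0 ls = ls.mapIdx piEncB := by
  rw [piEncFrom_eq_mapIdx]; simp

theorem piEncB_congr (k k' : Nat) (c : Char) (h : k % piDigitsB.length = k' % piDigitsB.length) :
    piEncB k c = piEncB k' c := by
  simp only [piEncB, h]

theorem piEncFrom_congr (ls : List Char) : ∀ (k k' : Nat),
    k % piDigitsB.length = k' % piDigitsB.length → piEncFrom k ls = piEncFrom k' ls := by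
  induction ls with
  | nil => intro k k' _; rfl
  | cons c ls ih =>
    intro k k' h
    have h' : (k + 1) % piDigitsB.length = (k' + 1) % piDigitsB.length := by
      simp only [show piDigitsB.length = 20 from rfl] at h ⊢; omega
    simp only [piEncFrom, piEncB_congr k k' c h, ih (k + 1) (k' + 1) h']

-- main invariant: A's loop from state (k, acc) produces acc ++ B's merge of the encoded letters
theorem pi_main (cs : List Char) : ∀ (k : Nat) (acc : List Char), k < piDigitsA.length →
    (cs.foldl piStepA (k, acc)).2
      = acc ++ piMergeB cs (piEncFrom k (cs.filter (fun c => lowerB.contains c))) := by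
  induction cs with
  | nil => intro k acc _; simp [piMergeB]
  | cons c cs ih =>
    intro k acc hk
    by_cases hc : c ∈ lowerB
    · have hsp : ¬ (c = ' ') := by
        intro h; subst h; simp [lowerB] at hc
      have hk' : k % piDigitsB.length = k := Nat.mod_eq_of_lt hk
      have hstep : piStepA (k, acc) c = ((k + 1) % piDigitsA.length, acc ++ [piEncB k c]) := by
        simp [piStepA, piEncB, if_neg hsp, lowerA_eq_lowerB, piDigitsA_eq, hc, hk']
      rw [List.foldl_cons, hstep, ih _ _ (Nat.mod_lt _ (by simp [piDigitsA]))]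
      have hfil : (c :: cs).filter (fun c => lowerB.contains c)
          = c :: cs.filter (fun c => lowerB.contains c) := by
        simp [hc]
      rw [hfil]
      rw [piEncFrom_congr _ ((k + 1) % piDigitsA.length) (k + 1)
        (Nat.mod_mod_of_dvd _ dvd_rfl)]
      simp [piEncFrom, piMergeB, hc]
    · have hstep : piStepA (k, acc) c = (k, acc ++ [c]) := by
        by_cases hsp : c = ' '
        · subst hsp; simp [piStepA]
        · simp [piStepA, if_neg hsp, lowerA_eq_lowerB, hc]
      rw [List.foldl_cons, hstep, ih _ _ hk]
      have hfil : (c :: cs).filter (fun c => lowerB.contains c)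
          = cs.filter (fun c => lowerB.contains c) := by
        simp [hc]
      rw [hfil]
      simp [piMergeB, hc]

-- ===== VERDICT (by name: the statement is the Claim_ definition above) =====
theorem pi_code_spec : Claim_equal_pi_code := by
  intro text _
  unfold Spec_pi_code pi_code pi_code_alt
  rw [pi_main text.toList 0 [] (by simp [piDigitsA]), piEncFrom_zero]
  simp
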